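-- pv_equiv track=rewrite | github.com/B3rt0oo/global-IPV4-port-scanner-PoC | Global_IPV4_Port_Scanner.py | parse_ports_arg
-- ===== SOURCE A (Python) =====
-- from typing import List, Dict, Tuple, Optional
--
-- def parse_ports_arg(spec: str) -> List[int]:
--     """
--     Parse ports specification supporting:
--     - CSV: "80,443,22"
--     - Ranges: "20-25"
--     - Keyword: "all" or "1-65535" for full range
--     Returns a sorted unique list of ints in [1,65535].
--     """
--     spec = (spec or "").strip().lower()
--     if not spec:
--         return []
--     if spec == "all" or spec == "1-65535":
--         return list(range(1, 65536))
--     out: set[int] = set()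
--     for part in spec.split(','):
--         p = part.strip()
--         if not p:
--             continue
--         if '-' in p:
--             a, b = p.split('-', 1)
--             try:
--                 start = max(1, int(a))
--                 end = min(65535, int(b))
--             except ValueError:
--                 continue
--             if start > end:
--                 start, end = end, start
--             for v in range(start, end + 1):
--                 out.add(v)
--         else:
--             try:
--                 v = int(p)
--             except ValueError:
--                 continue
--             if 1 <= v <= 65535:
--                 out.add(v)
--     return sorted(out)
-- ===== SOURCE B (Python) =====
-- from typing import List, Optional, Tuple
--
-- def _parse_part(part: str) -> Optional[Tuple[int, int]]:
--     """Parse one comma-separated token into a closed interval, or None to skip."""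
--     p = part.strip()
--     if not p:
--         return None
--     if '-' in p:
--         a, b = p.split('-', 1)
--         try:
--             start = max(1, int(a))
--             end = min(65535, int(b))
--         except ValueError:
--             return None
--         if start > end:
--             start, end = end, start
--         return (start, end)
--     try:
--         v = int(p)
--     except ValueError:
--         return None
--     if 1 <= v <= 65535:
--         return (v, v)
--     return None
--
-- def parse_ports_arg(spec: str) -> List[int]:
--     spec = (spec or "").strip().lower()
--     if not spec:
--         return []
--     if spec == "all" or spec == "1-65535":
--         return list(range(1, 65536))
--     intervals = [iv for iv in map(_parse_part, spec.split(',')) if iv is not None]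
--     intervals.sort(key=lambda t: t[0])
--     merged: List[Tuple[int, int]] = []
--     cur: Optional[Tuple[int, int]] = None
--     for s, e in intervals:
--         if cur is None:
--             cur = (s, e)
--         elif s <= cur[1] + 1:
--             if e > cur[1]:
--                 cur = (cur[0], e)
--         else:
--             merged.append(cur)
--             cur = (s, e)
--     if cur is not None:
--         merged.append(cur)
--     result: List[int] = []
--     for s, e in merged:
--         result.extend(range(s, e + 1))
--     return result
-- ===== Notes on version B (the rewrite author's own statement) =====
-- stated objective: alternative
-- what changed: B replaces A's per-port set accumulation (add every port of every token to a hash set, then sort) by parse->sort->merge->expand over normalized intervals: each token becomes one interval, intervals are sorted by start, overlapping/adjacent ones merged, and the merged intervals expanded in order, so no per-port set is ever built.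
import Mathlib
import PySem

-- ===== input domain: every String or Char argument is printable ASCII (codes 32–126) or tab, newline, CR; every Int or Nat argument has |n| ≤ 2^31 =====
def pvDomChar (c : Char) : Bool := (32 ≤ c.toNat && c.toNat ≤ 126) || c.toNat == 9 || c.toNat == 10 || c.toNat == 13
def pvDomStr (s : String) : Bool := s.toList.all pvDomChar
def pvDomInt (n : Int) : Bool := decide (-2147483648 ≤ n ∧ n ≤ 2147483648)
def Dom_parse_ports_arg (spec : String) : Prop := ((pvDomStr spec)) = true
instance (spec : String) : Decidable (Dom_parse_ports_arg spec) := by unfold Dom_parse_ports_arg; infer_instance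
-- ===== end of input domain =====

-- B replaces A's per-port set accumulation by parse→sort→merge→expand over intervals (alternative decomposition).
-- ===== PORT A =====
-- A-side helper: the body of A's 'for part in spec.split(',')' loop (adds the part's ports to the set).
def pvAStep (out : PySem.Set Int) (part : List Char) : PySem.Set Int :=
  let p := PySem.Chars.strip part
  if p = [] then out
  else if PySem.Chars.isIn ['-'] p then
    match PySem.Chars.splitOnMax p ['-'] 1 with
    | [a, b] =>
      match PySem.Int.ofChars? a, PySem.Int.ofChars? b with
      | some ia, some ib =>
        let start := max 1 ia
        let «end» := min 65535 ib
        let se := if start > «end» then («end», start) else (start, «end»)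
        (PySem.List.pyRange se.1 (se.2 + 1) 1).foldl PySem.Set.add out
      | _, _ => out
    | _ => out   -- unreachable: split('-', 1) with '-' in p gives exactly two pieces
  else
    match PySem.Int.ofChars? p with
    | some v => if 1 ≤ v ∧ v ≤ 65535 then PySem.Set.add out v else out
    | none => out

def parse_ports_arg (spec : String) : List Int :=
  let s := PySem.Chars.lower (PySem.Chars.strip spec.toList)   -- (spec or "") is the identity on strings
  if s = [] then []
  else if s = "all".toList ∨ s = "1-65535".toList then PySem.List.pyRange 1 65536 1
  else
    let out := (PySem.Chars.splitOn s [',']).foldl pvAStep PySem.Set.empty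
    PySem.List.sorted out (fun x => x) false

-- ===== PORT B =====
-- B-side helper: one token → normalized closed interval, or none to skip (Source B's _parse_part).
def pvParsePart (part : List Char) : Option (Int × Int) :=
  let p := PySem.Chars.strip part
  if p = [] then none
  else if PySem.Chars.isIn ['-'] p then
    match PySem.Chars.splitOnMax p ['-'] 1 with
    | [a, b] =>
      match PySem.Int.ofChars? a, PySem.Int.ofChars? b with
      | some ia, some ib =>
        let start := max 1 ia
        let «end» := min 65535 ib
        if start > «end» then some («end», start) else some (start, «end»)
      | _, _ => none
    | _ => none
  else
    match PySem.Int.ofChars? p with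
    | some v => if 1 ≤ v ∧ v ≤ 65535 then some (v, v) else none
    | none => none

-- the merge loop's body: state = (merged so far, current open interval)
def pvMergeStep (st : List (Int × Int) × Option (Int × Int)) (iv : Int × Int) :
    List (Int × Int) × Option (Int × Int) :=
  match st.2 with
  | none => (st.1, some iv)
  | some c =>
    if iv.1 ≤ c.2 + 1 then
      if iv.2 > c.2 then (st.1, some (c.1, iv.2)) else (st.1, some c)
    else (st.1 ++ [c], some iv)

def parse_ports_arg_alt (spec : String) : List Int :=
  let s := PySem.Chars.lower (PySem.Chars.strip spec.toList)
  if s = [] then []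
  else if s = "all".toList ∨ s = "1-65535".toList then PySem.List.pyRange 1 65536 1
  else
    let intervals := (PySem.Chars.splitOn s [',']).filterMap pvParsePart
    let sortedIv := PySem.List.sorted intervals (fun t => t.1) false
    let st := sortedIv.foldl pvMergeStep ([], none)
    let merged := match st.2 with | none => st.1 | some c => st.1 ++ [c]
    merged.foldl (fun res iv => res ++ PySem.List.pyRange iv.1 (iv.2 + 1) 1) []

-- ===== PRECONDITION & SPEC =====
-- ===== PRECONDITION & SPEC =====
def Spec_parse_ports_arg (spec : String) (out : List Int) : Prop := out = parse_ports_arg_alt spec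
instance (spec : String) (out : List Int) : Decidable (Spec_parse_ports_arg spec out) := by unfold Spec_parse_ports_arg; infer_instance

-- ===== CLAIM (what is proved, stated in full; the proofs are below) =====
def Claim_equal_parse_ports_arg : Prop := ∀ (spec : String), Dom_parse_ports_arg spec → Spec_parse_ports_arg spec (parse_ports_arg spec)

-- ===== LEMMAS AND PROOFS =====
theorem pvAStep_eq (out : PySem.Set Int) (part : List Char) :
    pvAStep out part =
      match pvParsePart part with
      | none => out
      | some iv => (PySem.List.pyRange iv.1 (iv.2 + 1) 1).foldl PySem.Set.add out := by
  unfold pvAStep pvParsePart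
  by_cases h1 : PySem.Chars.strip part = []
  · simp [h1]
  · simp only [h1, if_false]
    by_cases h2 : PySem.Chars.isIn ['-'] (PySem.Chars.strip part) = true
    · simp only [h2, ite_true]
      cases hs : PySem.Chars.splitOnMax (PySem.Chars.strip part) ['-'] 1 with
      | nil => rfl
      | cons a rest =>
        cases rest with
        | nil => rfl
        | cons b rest2 =>
          cases rest2 with
          | nil =>
            cases ha : PySem.Int.ofChars? a with
            | none => simp only [ha]
            | some ia =>
              cases hb : PySem.Int.ofChars? b with
              | none => simp only [ha, hb]
              | some ib =>
                by_cases hsw : max 1 ia > min 65535 ib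
                · simp only [ha, hb, if_pos hsw]
                · simp only [ha, hb, if_neg hsw]
          | cons _ _ => rfl
    · simp only [h2]
      cases hv : PySem.Int.ofChars? (PySem.Chars.strip part) with
      | none => simp
      | some v =>
        by_cases hr : 1 ≤ v ∧ v ≤ 65535
        · simp [hr, PySem.List.pyRange_one_singleton]
        · simp [hr]

theorem pv_mem_foldl_add (l : List Int) (s : PySem.Set Int) (x : Int) :
    x ∈ l.foldl PySem.Set.add s ↔ x ∈ s ∨ x ∈ l := by
  simpa using PySem.Set.mem_foldl_add (f := id) (l := l) (s := s) (y := x)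

theorem pv_nodup_foldl_add (l : List Int) (s : PySem.Set Int) (h : s.Nodup) :
    (l.foldl PySem.Set.add s).Nodup := by
  induction l generalizing s with
  | nil => exact h
  | cons a t ih => exact ih _ (PySem.Set.nodup_add s a h)

theorem pvA_mem (parts : List (List Char)) (s : PySem.Set Int) (x : Int) :
    x ∈ parts.foldl pvAStep s ↔
      x ∈ s ∨ ∃ iv ∈ parts.filterMap pvParsePart, iv.1 ≤ x ∧ x ≤ iv.2 := by
  induction parts generalizing s with
  | nil => simp
  | cons part rest ih =>
    rw [List.foldl_cons, ih, pvAStep_eq]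
    cases hp : pvParsePart part with
    | none => simp [hp]
    | some iv =>
      simp only [hp, List.filterMap_cons, pv_mem_foldl_add, PySem.List.mem_pyRange_one,
        List.mem_cons, Int.lt_add_one_iff]
      constructor
      · rintro ((h | h) | ⟨jv, hm, hc⟩)
        · exact Or.inl h
        · exact Or.inr ⟨iv, Or.inl rfl, h⟩
        · exact Or.inr ⟨jv, Or.inr hm, hc⟩
      · rintro (h | ⟨jv, (rfl | hm), hc⟩)
        · exact Or.inl (Or.inl h)
        · exact Or.inl (Or.inr hc)
        · exact Or.inr ⟨jv, hm, hc⟩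

theorem pvA_nodup (parts : List (List Char)) (s : PySem.Set Int) (h : s.Nodup) :
    (parts.foldl pvAStep s).Nodup := by
  induction parts generalizing s with
  | nil => exact h
  | cons part rest ih =>
    rw [List.foldl_cons, pvAStep_eq]
    cases hp : pvParsePart part with
    | none => exact ih _ h
    | some iv => exact ih _ (pv_nodup_foldl_add _ _ h)

theorem pvParsePart_le (part : List Char) (iv : Int × Int) (h : pvParsePart part = some iv) :
    iv.1 ≤ iv.2 := by
  unfold pvParsePart at h
  by_cases h1 : PySem.Chars.strip part = []
  · simp [h1] at h
  · rw [if_neg h1] at h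
    by_cases h2 : PySem.Chars.isIn ['-'] (PySem.Chars.strip part) = true
    · rw [if_pos h2] at h
      cases hs : PySem.Chars.splitOnMax (PySem.Chars.strip part) ['-'] 1 with
      | nil => rw [hs] at h; cases h
      | cons a rest =>
        cases rest with
        | nil => rw [hs] at h; cases h
        | cons b rest2 =>
          cases rest2 with
          | cons _ _ => rw [hs] at h; cases h
          | nil =>
            rw [hs] at h
            cases ha : PySem.Int.ofChars? a with
            | none => simp [ha] at h
            | some ia =>
              cases hb : PySem.Int.ofChars? b with
              | none => simp [ha, hb] at h
              | some ib =>
                simp only [ha, hb] at h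
                split_ifs at h with hsw <;>
                  (injection h with h'; subst h'; dsimp only; omega)
    · rw [if_neg h2] at h
      cases hv : PySem.Int.ofChars? (PySem.Chars.strip part) with
      | none => simp [hv] at h
      | some v =>
        simp only [hv] at h
        split_ifs at h with hr
        injection h with h'; subst h'; dsimp only; omega

def pvMergeRec (c : Int × Int) : List (Int × Int) → List (Int × Int)
  | [] => [c]
  | iv :: rest =>
    if iv.1 ≤ c.2 + 1 then
      if iv.2 > c.2 then pvMergeRec (c.1, iv.2) rest else pvMergeRec c rest
    else c :: pvMergeRec iv rest

theorem pvMerge_fold_eq (l : List (Int × Int)) (acc : List (Int × Int)) (c : Int × Int) :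
    (match (l.foldl pvMergeStep (acc, some c)).2 with
      | none => (l.foldl pvMergeStep (acc, some c)).1
      | some d => (l.foldl pvMergeStep (acc, some c)).1 ++ [d]) = acc ++ pvMergeRec c l := by
  induction l generalizing acc c with
  | nil => simp [pvMergeRec]
  | cons iv rest ih =>
    rw [List.foldl_cons]
    by_cases h1 : iv.1 ≤ c.2 + 1
    · by_cases h2 : iv.2 > c.2
      · have hstep : pvMergeStep (acc, some c) iv = (acc, some (c.1, iv.2)) := by
          simp [pvMergeStep, h1, h2]
        rw [hstep, ih]
        simp [pvMergeRec, h1, h2]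
      · have hstep : pvMergeStep (acc, some c) iv = (acc, some c) := by
          simp [pvMergeStep, h1, h2]
        rw [hstep, ih]
        simp [pvMergeRec, h1, h2]
    · have hstep : pvMergeStep (acc, some c) iv = (acc ++ [c], some iv) := by
        simp [pvMergeStep, h1]
      rw [hstep, ih]
      simp [pvMergeRec, h1]

theorem pvMergeRec_fst_le (c : Int × Int) (l : List (Int × Int))
    (hcl : ∀ iv ∈ l, c.1 ≤ iv.1) (hl : l.Pairwise (fun a b => a.1 ≤ b.1)) :
    ∀ d ∈ pvMergeRec c l, c.1 ≤ d.1 := by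
  induction l generalizing c with
  | nil => intro d hd; simp [pvMergeRec] at hd; subst hd; exact le_refl _
  | cons iv rest ih =>
    have hci : c.1 ≤ iv.1 := hcl iv (List.mem_cons_self ..)
    rw [List.pairwise_cons] at hl
    intro d hd
    rw [pvMergeRec] at hd
    by_cases h1 : iv.1 ≤ c.2 + 1
    · by_cases h2 : iv.2 > c.2
      · rw [if_pos h1, if_pos h2] at hd
        exact ih (c.1, iv.2) (fun jv hj => hcl jv (List.mem_cons_of_mem _ hj)) hl.2 d hd
      · rw [if_pos h1, if_neg h2] at hd
        exact ih c (fun jv hj => hcl jv (List.mem_cons_of_mem _ hj)) hl.2 d hd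
    · rw [if_neg h1] at hd
      rcases List.mem_cons.mp hd with rfl | hd'
      · exact le_refl _
      · exact le_trans hci (ih iv hl.1 hl.2 d hd')

theorem pvMergeRec_mem (c : Int × Int) (l : List (Int × Int)) (x : Int)
    (hc : c.1 ≤ c.2) (hse : ∀ iv ∈ l, iv.1 ≤ iv.2)
    (hcl : ∀ iv ∈ l, c.1 ≤ iv.1)
    (hl : l.Pairwise (fun a b => a.1 ≤ b.1)) :
    (∃ d ∈ pvMergeRec c l, d.1 ≤ x ∧ x ≤ d.2) ↔
      (c.1 ≤ x ∧ x ≤ c.2) ∨ ∃ iv ∈ l, iv.1 ≤ x ∧ x ≤ iv.2 := by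
  induction l generalizing c with
  | nil => simp [pvMergeRec]
  | cons iv rest ih =>
    have hiv : iv.1 ≤ iv.2 := hse iv (List.mem_cons_self ..)
    have hci : c.1 ≤ iv.1 := hcl iv (List.mem_cons_self ..)
    rw [List.pairwise_cons] at hl
    have hse' : ∀ jv ∈ rest, jv.1 ≤ jv.2 := fun jv hj => hse jv (List.mem_cons_of_mem _ hj)
    have hcl' : ∀ jv ∈ rest, c.1 ≤ jv.1 := fun jv hj => hcl jv (List.mem_cons_of_mem _ hj)
    rw [pvMergeRec]
    by_cases h1 : iv.1 ≤ c.2 + 1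
    · by_cases h2 : iv.2 > c.2
      · rw [if_pos h1, if_pos h2, ih (c.1, iv.2) (le_trans hci hiv) hse' hcl' hl.2]
        simp only [List.mem_cons]
        constructor
        · rintro (h | ⟨jv, hj, hc'⟩)
          · by_cases hx : x ≤ c.2
            · exact Or.inl (by omega)
            · exact Or.inr ⟨iv, Or.inl rfl, by omega⟩
          · exact Or.inr ⟨jv, Or.inr hj, hc'⟩
        · rintro (h | ⟨jv, (rfl | hj), hc'⟩)
          · exact Or.inl (by omega)
          · exact Or.inl (by omega)
          · exact Or.inr ⟨jv, hj, hc'⟩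
      · rw [if_pos h1, if_neg h2, ih c hc hse' hcl' hl.2]
        simp only [List.mem_cons]
        constructor
        · rintro (h | ⟨jv, hj, hc'⟩)
          · exact Or.inl h
          · exact Or.inr ⟨jv, Or.inr hj, hc'⟩
        · rintro (h | ⟨jv, (rfl | hj), hc'⟩)
          · exact Or.inl h
          · exact Or.inl (by omega)
          · exact Or.inr ⟨jv, hj, hc'⟩
    · rw [if_neg h1]
      have hcl'' : ∀ jv ∈ rest, iv.1 ≤ jv.1 := fun jv hj => hl.1 jv hj
      simp only [List.mem_cons, exists_eq_or_imp, ih iv hiv hse' hcl'' hl.2]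

theorem pvMergeRec_pairwise (c : Int × Int) (l : List (Int × Int))
    (hse : ∀ iv ∈ l, iv.1 ≤ iv.2)
    (hcl : ∀ iv ∈ l, c.1 ≤ iv.1)
    (hl : l.Pairwise (fun a b => a.1 ≤ b.1)) :
    (pvMergeRec c l).Pairwise (fun a b => a.2 + 1 < b.1) := by
  induction l generalizing c with
  | nil => simp [pvMergeRec]
  | cons iv rest ih =>
    have hiv : iv.1 ≤ iv.2 := hse iv (List.mem_cons_self ..)
    rw [List.pairwise_cons] at hl
    have hse' : ∀ jv ∈ rest, jv.1 ≤ jv.2 := fun jv hj => hse jv (List.mem_cons_of_mem _ hj)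
    have hcl' : ∀ jv ∈ rest, c.1 ≤ jv.1 := fun jv hj => hcl jv (List.mem_cons_of_mem _ hj)
    rw [pvMergeRec]
    by_cases h1 : iv.1 ≤ c.2 + 1
    · by_cases h2 : iv.2 > c.2
      · rw [if_pos h1, if_pos h2]
        exact ih (c.1, iv.2) hse' hcl' hl.2
      · rw [if_pos h1, if_neg h2]
        exact ih c hse' hcl' hl.2
    · rw [if_neg h1]
      rw [List.pairwise_cons]
      refine ⟨fun d hd => ?_, ih iv hse' hl.1 hl.2⟩
      have := pvMergeRec_fst_le iv rest hl.1 hl.2 d hd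
      omega

theorem pvExpand_mem (merged : List (Int × Int)) (x : Int) :
    x ∈ merged.foldl (fun res iv => res ++ PySem.List.pyRange iv.1 (iv.2 + 1) 1) [] ↔
      ∃ iv ∈ merged, iv.1 ≤ x ∧ x ≤ iv.2 := by
  rw [PySem.List.foldl_append_eq_flatMap]
  simp [List.mem_flatMap, PySem.List.mem_pyRange_one]

theorem pvExpand_pairwise (merged : List (Int × Int))
    (hp : merged.Pairwise (fun a b => a.2 + 1 < b.1)) :
    (merged.foldl (fun res iv => res ++ PySem.List.pyRange iv.1 (iv.2 + 1) 1) []).Pairwise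
      (· < ·) := by
  rw [PySem.List.foldl_append_eq_flatMap]
  simp only [List.nil_append]
  rw [List.pairwise_flatMap]
  refine ⟨fun a _ => PySem.List.pairwise_lt_pyRange_one _ _, ?_⟩
  refine hp.imp ?_
  intro a b hab x hx y hy
  rw [PySem.List.mem_pyRange_one] at hx hy
  omega

theorem pv_strict_eq (l1 l2 : List Int) (h1 : l1.Pairwise (· < ·)) (h2 : l2.Pairwise (· < ·))
    (hm : ∀ x, x ∈ l1 ↔ x ∈ l2) : l1 = l2 :=
  List.Perm.eq_of_pairwise (le := (· ≤ ·)) (fun _ _ _ _ hab hba => le_antisymm hab hba)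
    (h1.imp le_of_lt) (h2.imp le_of_lt)
    ((List.perm_ext_iff_of_nodup (h1.imp ne_of_lt) (h2.imp ne_of_lt)).mpr hm)

theorem pv_parse_ports_arg_eq (spec : String) :
    parse_ports_arg spec = parse_ports_arg_alt spec := by
  unfold parse_ports_arg parse_ports_arg_alt
  by_cases h1 : PySem.Chars.lower (PySem.Chars.strip spec.toList) = []
  · simp [h1]
  · by_cases h2 : PySem.Chars.lower (PySem.Chars.strip spec.toList) = "all".toList ∨
        PySem.Chars.lower (PySem.Chars.strip spec.toList) = "1-65535".toList
    · rcases h2 with h2 | h2 <;> simp [h2]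
    · simp only [h1, h2, if_false]
      have hA_pw : (PySem.List.sorted
          ((PySem.Chars.splitOn (PySem.Chars.lower (PySem.Chars.strip spec.toList)) [',']).foldl
            pvAStep PySem.Set.empty) (fun x => x)).Pairwise (· < ·) := by
        rw [← PySem.Set.ofList_eq_self_of_nodup _
          (pvA_nodup _ PySem.Set.empty (show (PySem.Set.empty : PySem.Set Int).Nodup from
            List.nodup_nil))]
        exact PySem.List.sorted_ofList_pairwise_lt _
      generalize PySem.Chars.splitOn (PySem.Chars.lower (PySem.Chars.strip spec.toList)) [','] =
        parts at hA_pw ⊢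
      have hA_mem : ∀ x, (x ∈ PySem.List.sorted (parts.foldl pvAStep PySem.Set.empty)
            (fun x => x)) ↔ ∃ iv ∈ parts.filterMap pvParsePart, iv.1 ≤ x ∧ x ≤ iv.2 := by
        intro x
        rw [PySem.List.mem_sorted, pvA_mem]
        simp [PySem.Set.empty]
      have hse : ∀ iv ∈ PySem.List.sorted (parts.filterMap pvParsePart) (fun t => t.1) false,
          iv.1 ≤ iv.2 := by
        intro iv hm
        rw [PySem.List.mem_sorted] at hm
        obtain ⟨part, _, hp⟩ := List.mem_filterMap.mp hm
        exact pvParsePart_le part iv hp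
      have hpw := PySem.List.sorted_pairwise (parts.filterMap pvParsePart) (fun t => t.1)
      have hmem_sorted : ∀ iv, (iv ∈ parts.filterMap pvParsePart) ↔
          iv ∈ PySem.List.sorted (parts.filterMap pvParsePart) (fun t => t.1) false :=
        fun iv => (PySem.List.mem_sorted _ _ _ _).symm
      cases hsv : PySem.List.sorted (parts.filterMap pvParsePart) (fun t => t.1) false with
      | nil =>
        have hivs : parts.filterMap pvParsePart = [] :=
          (PySem.List.sorted_eq_nil_iff _ _ _).mp hsv
        have hAnil : PySem.List.sorted (parts.foldl pvAStep PySem.Set.empty) (fun x => x) = [] := by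
          apply List.eq_nil_iff_forall_not_mem.mpr
          intro x hx
          rw [hA_mem x, hivs] at hx
          simp at hx
        rw [hAnil]
        rfl
      | cons iv0 rest =>
        rw [hsv] at hse hpw
        rw [List.pairwise_cons] at hpw
        have hc0 : iv0.1 ≤ iv0.2 := hse iv0 (List.mem_cons_self ..)
        have hse' : ∀ iv ∈ rest, iv.1 ≤ iv.2 := fun iv h => hse iv (List.mem_cons_of_mem _ h)
        have hcl : ∀ iv ∈ rest, iv0.1 ≤ iv.1 := hpw.1
        have hmerged := pvMerge_fold_eq rest [] iv0
        rw [List.nil_append] at hmerged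
        rw [show List.foldl pvMergeStep ([], none) (iv0 :: rest) =
              List.foldl pvMergeStep (([] : List (Int × Int)), some iv0) rest from rfl, hmerged]
        apply pv_strict_eq _ _ hA_pw
          (pvExpand_pairwise _ (pvMergeRec_pairwise iv0 rest hse' hcl hpw.2))
        intro x
        rw [hA_mem x, pvExpand_mem, pvMergeRec_mem iv0 rest x hc0 hse' hcl hpw.2]
        have hiff : ∀ iv, (iv ∈ parts.filterMap pvParsePart) ↔ iv = iv0 ∨ iv ∈ rest := by
          intro iv
          rw [hmem_sorted iv, hsv, List.mem_cons]
        simp only [hiff, exists_eq_or_imp]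

-- ===== VERDICT (by name: the statement is the Claim_ definition above) =====
theorem parse_ports_arg_spec : Claim_equal_parse_ports_arg := by
  intro spec _
  exact pv_parse_ports_arg_eq spec
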